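-- pv_equiv track=rewrite | github.com/Romansaurius/Datasnap | optimizers/perfect_final_parser.py | _split_respecting_parentheses
-- ===== SOURCE A (Python) =====
-- def _split_respecting_parentheses(text: str, delimiter: str) -> list:
--     """Divide texto respetando paréntesis"""
--     parts = []
--     current = ""
--     paren_count = 0
--
--     for char in text:
--         if char == '(':
--             paren_count += 1
--         elif char == ')':
--             paren_count -= 1
--         elif char == delimiter and paren_count == 0:
--             parts.append(current)
--             current = ""
--             continue
--         current += char
--
--     if current:
--         parts.append(current)
--
--     return parts
-- ===== SOURCE B (Python) =====
-- def _split_respecting_parentheses(text: str, delimiter: str) -> list: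
--     """Divide texto respetando parentesis (boundary-index version)."""
--     boundaries = []
--     depth = 0
--     for i, ch in enumerate(text):
--         if ch == '(':
--             depth += 1
--         elif ch == ')':
--             depth -= 1
--         elif ch == delimiter and depth == 0:
--             boundaries.append(i)
--     parts = []
--     start = 0
--     for b in boundaries:
--         parts.append(text[start:b])
--         start = b + 1
--     tail = text[start:]
--     if tail:
--         parts.append(tail)
--     return parts
-- ===== Notes on version B (the rewrite author's own statement) =====
-- stated objective: alternative
-- what changed: A accumulates each segment character by character in a growing `current` buffer; B first records the indices of top-level delimiters in one depth-tracking pass, then builds the parts in a second pass by slicing the text between consecutive boundaries (trailing slice appended only if non-empty).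
import Mathlib
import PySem

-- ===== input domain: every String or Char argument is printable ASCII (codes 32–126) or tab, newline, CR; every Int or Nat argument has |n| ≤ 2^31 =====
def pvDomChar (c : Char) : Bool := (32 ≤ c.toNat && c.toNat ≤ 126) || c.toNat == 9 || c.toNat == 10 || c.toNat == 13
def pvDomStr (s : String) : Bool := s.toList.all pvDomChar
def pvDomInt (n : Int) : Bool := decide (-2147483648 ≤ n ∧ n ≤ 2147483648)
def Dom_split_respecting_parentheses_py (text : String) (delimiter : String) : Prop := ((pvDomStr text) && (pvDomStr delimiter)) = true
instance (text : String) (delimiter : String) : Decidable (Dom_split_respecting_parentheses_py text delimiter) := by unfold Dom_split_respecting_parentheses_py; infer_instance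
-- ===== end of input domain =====

-- B replaces A's segment accumulator with a boundary-index pass plus a slicing pass
-- (alternative decomposition, same O(n) cost); same return value everywhere.

-- ===== PORT A =====
-- the for-loop of A, state (parts, current, paren_count); after the loop the
-- trailing `if current: parts.append(current)` is applied
def pvLoopA (delimiter : String) : List Char → List String → String → Int → List String
  | [], parts, current, _ =>
      if current ≠ "" then parts ++ [current] else parts
  | c :: cs, parts, current, paren_count =>
      if c = '(' then pvLoopA delimiter cs parts (current.push c) (paren_count + 1)
      else if c = ')' then pvLoopA delimiter cs parts (current.push c) (paren_count - 1)
      else if String.singleton c = delimiter ∧ paren_count = 0 then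
        pvLoopA delimiter cs (parts ++ [current]) "" paren_count
      else pvLoopA delimiter cs parts (current.push c) paren_count

def split_respecting_parentheses_py (text : String) (delimiter : String) : List String :=
  pvLoopA delimiter text.toList [] "" 0

-- ===== PORT B =====
-- first loop of Source B: indices where char == delimiter at depth 0 ('('/')' checked first)
def pvBnd (delimiter : String) : List Char → Nat → Int → List Nat
  | [], _, _ => []
  | c :: cs, i, depth =>
      if c = '(' then pvBnd delimiter cs (i + 1) (depth + 1)
      else if c = ')' then pvBnd delimiter cs (i + 1) (depth - 1)
      else if String.singleton c = delimiter ∧ depth = 0 then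
        i :: pvBnd delimiter cs (i + 1) depth
      else pvBnd delimiter cs (i + 1) depth

-- second loop of Source B: python slices text[start:b] / text[start:] with
-- 0 ≤ start ≤ b ≤ len are exactly drop/take on the character list (exact here,
-- since all indices produced are nonnegative and in range)
def pvBuild (full : List Char) : List Nat → Nat → List String
  | [], start =>
      let tail := String.ofList (full.drop start)
      if tail ≠ "" then [tail] else []
  | b :: bs, start =>
      String.ofList ((full.drop start).take (b - start)) :: pvBuild full bs (b + 1)

def split_respecting_parentheses_py_alt (text : String) (delimiter : String) : List String :=
  pvBuild text.toList (pvBnd delimiter text.toList 0 0) 0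

-- ===== PRECONDITION & SPEC =====
def Spec_split_respecting_parentheses_py (text : String) (delimiter : String) (out : List String) : Prop := out = split_respecting_parentheses_py_alt text delimiter
instance (text : String) (delimiter : String) (out : List String) : Decidable (Spec_split_respecting_parentheses_py text delimiter out) := by unfold Spec_split_respecting_parentheses_py; infer_instance

-- ===== CLAIM (what is proved, stated in full; the proofs are below) =====
def Claim_equal_split_respecting_parentheses_py : Prop := ∀ (text : String) (delimiter : String), Dom_split_respecting_parentheses_py text delimiter → Spec_split_respecting_parentheses_py text delimiter (split_respecting_parentheses_py text delimiter)

-- ===== LEMMAS AND PROOFS =====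

-- A's loop with current carried as an explicit char list and parts peeled off
def pvF (delimiter : String) : List Char → List Char → Int → List String
  | [], cur, _ => if cur ≠ [] then [String.ofList cur] else []
  | c :: cs, cur, pc =>
      if c = '(' then pvF delimiter cs (cur ++ [c]) (pc + 1)
      else if c = ')' then pvF delimiter cs (cur ++ [c]) (pc - 1)
      else if String.singleton c = delimiter ∧ pc = 0 then
        String.ofList cur :: pvF delimiter cs [] pc
      else pvF delimiter cs (cur ++ [c]) pc

theorem ofList_ne_empty_iff (l : List Char) : (String.ofList l ≠ "") ↔ l ≠ [] := by
  constructor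
  · intro h hl; simp [hl] at h
  · intro h he; apply h; have := congrArg String.toList he; simpa using this

theorem push_ofList (l : List Char) (c : Char) :
    (String.ofList l).push c = String.ofList (l ++ [c]) := by
  apply String.toList_injective; simp

theorem loopA_eq_pvF (delimiter : String) (cs : List Char) :
    ∀ (parts : List String) (cur : List Char) (pc : Int),
      pvLoopA delimiter cs parts (String.ofList cur) pc = parts ++ pvF delimiter cs cur pc := by
  induction cs with
  | nil =>
      intro parts cur pc
      simp only [pvLoopA, pvF, ofList_ne_empty_iff]
      split <;> simp
  | cons c cs ih =>
      intro parts cur pc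
      simp only [pvLoopA, pvF, push_ofList]
      split
      · exact ih parts (cur ++ [c]) (pc + 1)
      · split
        · exact ih parts (cur ++ [c]) (pc - 1)
        · split
          · have : ("" : String) = String.ofList [] := rfl
            rw [this, ih (parts ++ [String.ofList cur]) [] pc]
            simp
          · exact ih parts (cur ++ [c]) pc

theorem seg_prefix (pre X : List Char) (start : Nat) (h : start ≤ pre.length) :
    ((pre ++ X).drop start).take (pre.length - start) = pre.drop start := by
  rw [List.drop_append_of_le_length h]
  have hl : (pre.drop start).length = pre.length - start := by simp
  rw [← hl, List.take_left]

theorem pvF_eq_build (delimiter : String) (cs : List Char) :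
    ∀ (pre : List Char) (start : Nat) (pc : Int), start ≤ pre.length →
      pvF delimiter cs (pre.drop start) pc
        = pvBuild (pre ++ cs) (pvBnd delimiter cs pre.length pc) start := by
  induction cs with
  | nil =>
      intro pre start pc _
      simp [pvF, pvBnd, pvBuild]
  | cons c cs ih =>
      intro pre start pc h
      have hdrop : pre.drop start ++ [c] = (pre ++ [c]).drop start := by
        rw [List.drop_append_of_le_length h]
      have hlen : (pre ++ [c]).length = pre.length + 1 := by simp
      have happ : pre ++ c :: cs = (pre ++ [c]) ++ cs := by simp
      simp only [pvF, pvBnd]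
      split
      · rw [hdrop, ih (pre ++ [c]) start (pc + 1) (by rw [hlen]; omega), hlen, happ]
      · split
        · rw [hdrop, ih (pre ++ [c]) start (pc - 1) (by rw [hlen]; omega), hlen, happ]
        · split
          · rw [happ]
            simp only [pvBuild]
            congr 1
            · rw [← happ, seg_prefix pre (c :: cs) start h]
            · have h0 : (pre ++ [c]).drop (pre.length + 1) = [] := by
                rw [← hlen, List.drop_length]
              calc pvF delimiter cs [] pc
                  = pvF delimiter cs ((pre ++ [c]).drop (pre.length + 1)) pc := by rw [h0]
                _ = pvBuild ((pre ++ [c]) ++ cs) (pvBnd delimiter cs (pre ++ [c]).length pc) (pre.length + 1) := by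
                      exact ih (pre ++ [c]) (pre.length + 1) pc (by rw [hlen])
                _ = pvBuild ((pre ++ [c]) ++ cs) (pvBnd delimiter cs (pre.length + 1) pc) (pre.length + 1) := by rw [hlen]
          · rw [hdrop, ih (pre ++ [c]) start pc (by rw [hlen]; omega), hlen, happ]

-- ===== VERDICT (by name: the statement is the Claim_ definition above) =====
theorem split_respecting_parentheses_py_spec : Claim_equal_split_respecting_parentheses_py := by
  intro text delimiter _
  show split_respecting_parentheses_py text delimiter = split_respecting_parentheses_py_alt text delimiter
  unfold split_respecting_parentheses_py split_respecting_parentheses_py_alt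
  have h0 : ("" : String) = String.ofList [] := rfl
  rw [h0, loopA_eq_pvF]
  have := pvF_eq_build delimiter text.toList [] 0 0 (by simp)
  simpa using this
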